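-- pv_equiv track=rewrite | github.com/ahorazahedi/miniature-engine | metformin_openmm_sim.py | determine_dissolution_mechanism
-- ===== SOURCE A (Python) =====
-- def determine_dissolution_mechanism(metformin_results, excipient_results):
--     """
--     Determine the dissolution mechanism based on excipient behavior
--     """
--     # Analyze excipient properties to determine dissolution mechanism
--     has_super_disintegrant = any('croscarmellose' in name or 'starch' in name
--                                for name in excipient_results.keys())
--     has_hydrophilic_polymer = any('povidone' in name or 'hydroxypropyl' in name
--                                 for name in excipient_results.keys())
--
--     if has_super_disintegrant and has_hydrophilic_polymer:
--         return "Matrix disintegration with polymer-controlled release"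
--     elif has_super_disintegrant:
--         return "Rapid disintegration with immediate release"
--     elif has_hydrophilic_polymer:
--         return "Controlled release with polymer matrix"
--     else:
--         return "Simple dissolution"
-- ===== SOURCE B (Python) =====
-- _MECHANISMS = [
--     "Simple dissolution",
--     "Controlled release with polymer matrix",
--     "Rapid disintegration with immediate release",
--     "Matrix disintegration with polymer-controlled release",
-- ]
--
--
-- def _is_super_disintegrant(name):
--     return 'croscarmellose' in name or 'starch' in name
--
--
-- def _is_hydrophilic_polymer(name):
--     return 'povidone' in name or 'hydroxypropyl' in name
--
--
-- def determine_dissolution_mechanism(metformin_results, excipient_results):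
--     # Single pass building a 2-bit mechanism code (bit 1 = super disintegrant,
--     # bit 0 = hydrophilic polymer), with early exit once both bits are set;
--     # the message is then picked from a table instead of an if/elif chain.
--     code = 0
--     for name in excipient_results:  # iterating a dict iterates its keys
--         if _is_super_disintegrant(name):
--             code |= 2
--         if _is_hydrophilic_polymer(name):
--             code |= 1
--         if code == 3:
--             break
--     return _MECHANISMS[code]
-- ===== Notes on version B (the rewrite author's own statement) =====
-- stated objective: alternative
-- what changed: Replaces the two independent any(...) scans plus the if/elif/elif/else chain by a single traversal that accumulates a 2-bit mechanism code with early exit once both bits are set, and selects the message from a 4-entry table indexed by that code.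
import Mathlib
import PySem

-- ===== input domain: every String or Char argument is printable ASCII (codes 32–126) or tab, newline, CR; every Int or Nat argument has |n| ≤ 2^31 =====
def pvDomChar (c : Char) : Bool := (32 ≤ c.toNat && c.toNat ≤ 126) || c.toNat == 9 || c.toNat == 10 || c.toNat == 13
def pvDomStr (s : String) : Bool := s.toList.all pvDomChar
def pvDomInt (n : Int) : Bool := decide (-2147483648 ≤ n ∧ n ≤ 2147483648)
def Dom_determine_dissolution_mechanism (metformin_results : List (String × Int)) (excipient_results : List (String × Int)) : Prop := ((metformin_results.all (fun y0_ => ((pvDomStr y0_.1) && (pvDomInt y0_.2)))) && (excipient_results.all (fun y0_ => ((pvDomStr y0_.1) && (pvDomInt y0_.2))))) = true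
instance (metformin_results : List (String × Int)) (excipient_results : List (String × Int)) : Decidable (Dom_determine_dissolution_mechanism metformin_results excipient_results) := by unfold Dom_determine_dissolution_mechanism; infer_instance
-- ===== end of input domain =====

-- B replaces A's two any(...) scans + if/elif chain by one pass building a
-- 2-bit code (early exit at 3) and a table lookup; same outputs (alternative).

-- ===== PORT A =====
def determine_dissolution_mechanism (metformin_results : List (String × Int)) (excipient_results : List (String × Int)) : String :=
  let keys := PySem.Dict.keys (PySem.Dict.ofList excipient_results)
  let has_super_disintegrant := keys.any (fun name =>
    PySem.Str.isIn "croscarmellose" name || PySem.Str.isIn "starch" name)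
  let has_hydrophilic_polymer := keys.any (fun name =>
    PySem.Str.isIn "povidone" name || PySem.Str.isIn "hydroxypropyl" name)
  if has_super_disintegrant && has_hydrophilic_polymer then
    "Matrix disintegration with polymer-controlled release"
  else if has_super_disintegrant then
    "Rapid disintegration with immediate release"
  else if has_hydrophilic_polymer then
    "Controlled release with polymer matrix"
  else
    "Simple dissolution"

-- ===== PORT B =====
def pvMechTable : List String :=
  ["Simple dissolution",
   "Controlled release with polymer matrix",
   "Rapid disintegration with immediate release",
   "Matrix disintegration with polymer-controlled release"]

-- Source B's helper _is_super_disintegrant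
def pvSD (name : String) : Bool :=
  PySem.Str.isIn "croscarmellose" name || PySem.Str.isIn "starch" name

-- Source B's helper _is_hydrophilic_polymer
def pvHP (name : String) : Bool :=
  PySem.Str.isIn "povidone" name || PySem.Str.isIn "hydroxypropyl" name

-- the for-loop of Source B: accumulate the 2-bit code, break once code = 3
def pvCodeLoop : List String → Nat → Nat
  | [], code => code
  | name :: rest, code =>
    let code1 := if pvSD name then code ||| 2 else code
    let code2 := if pvHP name then code1 ||| 1 else code1
    if code2 == 3 then code2 else pvCodeLoop rest code2

def determine_dissolution_mechanism_alt (metformin_results : List (String × Int)) (excipient_results : List (String × Int)) : String :=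
  let keys := PySem.Dict.keys (PySem.Dict.ofList excipient_results)
  pvMechTable.getD (pvCodeLoop keys 0) ""

-- ===== PRECONDITION & SPEC =====
def Spec_determine_dissolution_mechanism (metformin_results : List (String × Int)) (excipient_results : List (String × Int)) (out : String) : Prop := out = determine_dissolution_mechanism_alt metformin_results excipient_results
instance (metformin_results : List (String × Int)) (excipient_results : List (String × Int)) (out : String) : Decidable (Spec_determine_dissolution_mechanism metformin_results excipient_results out) := by unfold Spec_determine_dissolution_mechanism; infer_instance

-- ===== CLAIM (what is proved, stated in full; the proofs are below) =====
def Claim_equal_determine_dissolution_mechanism : Prop := ∀ (metformin_results : List (String × Int)) (excipient_results : List (String × Int)), Dom_determine_dissolution_mechanism metformin_results excipient_results → Spec_determine_dissolution_mechanism metformin_results excipient_results (determine_dissolution_mechanism metformin_results excipient_results)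

-- ===== LEMMAS AND PROOFS =====

-- the loop computes exactly the code of the two any-scans, from any partial code ≤ 3
lemma pvCodeLoop_eq (l : List String) (code : Nat) (h : code ≤ 3) :
    pvCodeLoop l code =
      (if 2 ≤ code ∨ l.any pvSD then 2 else 0) + (if code % 2 = 1 ∨ l.any pvHP then 1 else 0) := by
  induction l generalizing code with
  | nil => interval_cases code <;> simp [pvCodeLoop]
  | cons name rest ih =>
    simp only [pvCodeLoop, List.any_cons]
    by_cases hs : pvSD name <;> by_cases hp : pvHP name <;>
      interval_cases code <;>
      simp [hs, hp, ih]

-- A's inline predicates are B's named helpers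
lemma any_pvSD (l : List String) :
    l.any (fun name => PySem.Str.isIn "croscarmellose" name || PySem.Str.isIn "starch" name) = l.any pvSD := rfl
lemma any_pvHP (l : List String) :
    l.any (fun name => PySem.Str.isIn "povidone" name || PySem.Str.isIn "hydroxypropyl" name) = l.any pvHP := rfl

-- ===== VERDICT (by name: the statement is the Claim_ definition above) =====
theorem determine_dissolution_mechanism_spec : Claim_equal_determine_dissolution_mechanism := by
  intro m e _
  unfold Spec_determine_dissolution_mechanism
  cases hs : (PySem.Dict.keys (PySem.Dict.ofList e)).any pvSD <;>
    cases hp : (PySem.Dict.keys (PySem.Dict.ofList e)).any pvHP <;>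
    simp only [determine_dissolution_mechanism, determine_dissolution_mechanism_alt,
      any_pvSD, any_pvHP, hs, hp, pvCodeLoop_eq _ 0 (by norm_num)] <;>
    rfl
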